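-- pv_equiv track=rewrite | github.com/makaveli2P/580-Project | p3/P3_2.py | line_join_query_p3_2
-- ===== SOURCE A (Python) =====
-- def line_join_query_p3_2(relations):
--     k = len(relations)
--     H = [dict() for _ in range(k)]
--     for i, Ri in enumerate(relations):
--         if i == 0:
--             for t in Ri:
--                 key = t[1]
--                 if key not in H[i]:
--                     H[i][key] = []
--                 H[i][key].append(t)
--         else:
--             for t in Ri:
--                 key = t[0]
--                 if key in H[i - 1]:
--                     prev_tuples = H[i - 1][key]
--                     new_tuples = [prev_t + t[1:] for prev_t in prev_tuples]
--                     for new_t in new_tuples: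
--                         key = new_t[-1]
--                         if key not in H[i]:
--                             H[i][key] = []
--                         H[i][key].append(new_t)
--
--     result = []
--     for tuples in H[k - 1].values():
--         result.extend(tuples)
--
--     return result
-- ===== SOURCE B (Python) =====
-- def line_join_query_p3_2(relations):
--     # Yannakakis-style chain join: a backward semi-join pass prunes tuples that
--     # cannot reach the last relation, then a forward hash join over the reduced
--     # relations; output order (grouped by final key) is unchanged.
--     first, rest = relations[0], relations[1:]
--
--     # backward semi-join reduction over rest (right to left)
--     pruned_rev = []
--     keys = None
--     for R in reversed(rest):
--         if keys is None:
--             S = R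
--         else:
--             S = [t for t in R if len(t) == 1 or t[-1] in keys]
--         pruned_rev.append(S)
--         keys = {t[0] for t in S}
--     pruned = list(reversed(pruned_rev))
--
--     if pruned:
--         first = [t for t in first if t[1] in keys]
--
--     # forward hash join over the reduced relations
--     d = {}
--     for t in first:
--         d.setdefault(t[1], []).append(t)
--     for R in pruned:
--         nxt = {}
--         for t in R:
--             for p in d.get(t[0], []):
--                 r = p + t[1:]
--                 nxt.setdefault(r[-1], []).append(r)
--         d = nxt
--     return [r for bucket in d.values() for r in bucket]
-- ===== Notes on version B (the rewrite author's own statement) =====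
-- stated objective: alternative
-- what changed: B uses the Yannakakis scheme: a backward semi-join pass prunes tuples that cannot reach the last relation, then a single forward hash join over the reduced relations, instead of A's forward-only hash join that materialises every dangling intermediate row in a list of per-level dicts.
import Mathlib
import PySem

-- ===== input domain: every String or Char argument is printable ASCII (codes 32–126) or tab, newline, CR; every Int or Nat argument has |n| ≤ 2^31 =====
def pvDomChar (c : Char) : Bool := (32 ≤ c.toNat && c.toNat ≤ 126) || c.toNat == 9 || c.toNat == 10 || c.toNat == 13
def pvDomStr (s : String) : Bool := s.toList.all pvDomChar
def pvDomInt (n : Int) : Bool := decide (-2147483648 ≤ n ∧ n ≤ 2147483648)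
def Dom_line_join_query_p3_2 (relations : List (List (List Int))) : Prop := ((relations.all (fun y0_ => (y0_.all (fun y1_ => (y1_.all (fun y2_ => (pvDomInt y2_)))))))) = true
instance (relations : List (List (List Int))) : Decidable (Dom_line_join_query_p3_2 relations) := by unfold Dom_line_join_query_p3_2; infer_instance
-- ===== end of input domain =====

-- One line: B replaces A's forward-only hash join by a backward semi-join reduction
-- (Yannakakis scheme) followed by a forward hash join over the reduced relations.

-- ===== PORT A =====

-- 'if key not in H[i]: H[i][key] = []' followed by 'H[i][key].append(t)'
def pvGroupAdd (d : PySem.Dict Int (List (List Int))) (key : Int) (t : List Int) :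
    PySem.Dict Int (List (List Int)) :=
  let d := if d.contains key then d else d.insert key []
  d.insert key (d.getD key [] ++ [t])

-- body of 'for t in Ri' in the i == 0 branch
def pvAFirst (d : PySem.Dict Int (List (List Int))) (t : List Int) :
    PySem.Dict Int (List (List Int)) :=
  let key := PySem.List.pyGetD t 1 0
  pvGroupAdd d key t

-- body of 'for t in Ri' in the i > 0 branch (prev = H[i-1], d = H[i])
def pvARest (prev : PySem.Dict Int (List (List Int))) (d : PySem.Dict Int (List (List Int)))
    (t : List Int) : PySem.Dict Int (List (List Int)) :=
  let key := PySem.List.pyGetD t 0 0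
  if prev.contains key then
    let prev_tuples := prev.getD key []
    let new_tuples := prev_tuples.map (fun p => p ++ PySem.List.slice t (some 1) none)
    new_tuples.foldl (fun d new_t => pvGroupAdd d (PySem.List.pyGetD new_t (-1) 0) new_t) d
  else d

-- body of 'for i, Ri in enumerate(relations)'
def pvAStep (H : List (PySem.Dict Int (List (List Int))))
    (iRi : Int × List (List Int)) : List (PySem.Dict Int (List (List Int))) :=
  let i := iRi.1
  let Ri := iRi.2
  if i = 0 then
    PySem.List.pySetD H i (Ri.foldl pvAFirst (PySem.List.pyGetD H i PySem.Dict.empty))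
  else
    PySem.List.pySetD H i
      (Ri.foldl (pvARest (PySem.List.pyGetD H (i - 1) PySem.Dict.empty))
        (PySem.List.pyGetD H i PySem.Dict.empty))

def line_join_query_p3_2 (relations : List (List (List Int))) : List (List Int) :=
  let k : Int := PySem.List.len relations
  let H : List (PySem.Dict Int (List (List Int))) :=
    (PySem.List.pyRange 0 k 1).map (fun _ => PySem.Dict.empty)
  let H := (PySem.List.enumerate relations 0).foldl pvAStep H
  (PySem.List.pyGetD H (k - 1) PySem.Dict.empty).values.foldl
    (fun result tuples => result ++ tuples) []

-- ===== PORT B =====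

-- 'd.setdefault(key, []).append(r)'
def pvSetdefaultAdd (d : PySem.Dict Int (List (List Int))) (key : Int) (r : List Int) :
    PySem.Dict Int (List (List Int)) :=
  let d := d.setdefault key []
  d.insert key (d.getD key [] ++ [r])

-- body of 'for R in reversed(rest)' (st = (pruned_rev, keys))
def pvBBack (st : List (List (List Int)) × Option (PySem.Set Int)) (R : List (List Int)) :
    List (List (List Int)) × Option (PySem.Set Int) :=
  let S := match st.2 with
    | none => R
    | some keys =>
        R.filter (fun t =>
          PySem.List.len t == 1 || keys.contains (PySem.List.pyGetD t (-1) 0))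
  (st.1 ++ [S], some (PySem.Set.ofList (S.map (fun t => PySem.List.pyGetD t 0 0))))

-- body of 'for R in pruned' (the forward hash-join step building nxt from d)
def pvBJoin (d : PySem.Dict Int (List (List Int))) (R : List (List Int)) :
    PySem.Dict Int (List (List Int)) :=
  R.foldl (fun nxt t =>
    (d.getD (PySem.List.pyGetD t 0 0) []).foldl (fun nxt p =>
      let r := p ++ PySem.List.slice t (some 1) none
      pvSetdefaultAdd nxt (PySem.List.pyGetD r (-1) 0) r) nxt)
    PySem.Dict.empty

def line_join_query_p3_2_alt (relations : List (List (List Int))) : List (List Int) :=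
  let first := PySem.List.pyGetD relations 0 []
  let rest := PySem.List.slice relations (some 1) none
  -- backward semi-join reduction over rest (right to left)
  let pk := rest.reverse.foldl pvBBack ([], none)
  let pruned := pk.1.reverse
  let first :=
    if pruned ≠ [] then
      match pk.2 with
      | some keys => first.filter (fun t => keys.contains (PySem.List.pyGetD t 1 0))
      | none => first
    else first
  -- forward hash join over the reduced relations
  let d := first.foldl (fun d t => pvSetdefaultAdd d (PySem.List.pyGetD t 1 0) t)
    PySem.Dict.empty
  let d := pruned.foldl pvBJoin d
  d.values.flatMap (fun bucket => bucket)

-- ===== PRECONDITION & SPEC =====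

-- Pre_ excludes exactly the inputs on which the Python A raises: an empty relations
-- list (H[-1] IndexError), a first-relation tuple of length < 2 (t[1] IndexError),
-- or a later-relation empty tuple (t[0] IndexError).
def Pre_line_join_query_p3_2 (relations : List (List (List Int))) : Prop :=
  relations ≠ [] ∧ (∀ t ∈ relations.headD [], 2 ≤ t.length) ∧
    (∀ R ∈ relations.tail, ∀ t ∈ R, 1 ≤ t.length)
instance (relations : List (List (List Int))) : Decidable (Pre_line_join_query_p3_2 relations) := by
  unfold Pre_line_join_query_p3_2; infer_instance

def pvWitness_line_join_query_p3_2 : List (List (List Int)) :=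
  [[[1, 2], [3, 4]], [[2, 5], [4], [9, 9]]]

def Spec_line_join_query_p3_2 (relations : List (List (List Int))) (out : List (List Int)) : Prop :=
  out = line_join_query_p3_2_alt relations
instance (relations : List (List (List Int))) (out : List (List Int)) : Decidable (Spec_line_join_query_p3_2 relations out) := by
  unfold Spec_line_join_query_p3_2; infer_instance

-- ===== CLAIM (what is proved, stated in full; the proofs are below) =====
def Claim_equal_line_join_query_p3_2 : Prop :=
  ∀ (relations : List (List (List Int))), Dom_line_join_query_p3_2 relations →
    Pre_line_join_query_p3_2 relations →
      Spec_line_join_query_p3_2 relations (line_join_query_p3_2 relations)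

-- ===== LEMMAS AND PROOFS =====

-- Common semantics: a join level is the flat list of (bucket key, row) pairs.

def pvIns (d : PySem.Dict Int (List (List Int))) (p : Int × List Int) :
    PySem.Dict Int (List (List Int)) :=
  d.insert p.1 (d.getD p.1 [] ++ [p.2])

def pvDict (L : List (Int × List Int)) : PySem.Dict Int (List (List Int)) :=
  L.foldl pvIns PySem.Dict.empty

def pvL0 (R : List (List Int)) : List (Int × List Int) :=
  R.map (fun t => (PySem.List.pyGetD t 1 0, t))

def pvSeg (L : List (Int × List Int)) (t : List Int) : List (Int × List Int) :=
  (L.filter (fun p => p.1 == PySem.List.pyGetD t 0 0)).map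
    (fun p => (PySem.List.pyGetD (p.2 ++ PySem.List.slice t (some 1) none) (-1) 0,
      p.2 ++ PySem.List.slice t (some 1) none))

def pvBStep (L : List (Int × List Int)) (R : List (List Int)) : List (Int × List Int) :=
  R.flatMap (pvSeg L)

def pvFinal (L : List (Int × List Int)) : List (List Int) :=
  (pvDict L).values.flatten

def pvKeysOf (S : List (List Int)) : PySem.Set Int :=
  PySem.Set.ofList (S.map (fun t => PySem.List.pyGetD t 0 0))

def pvPrune : List (List (List Int)) → List (List (List Int))
  | [] => []
  | R :: rest =>
    match pvPrune rest with
    | [] => [R]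
    | S :: P =>
        (R.filter (fun t =>
          PySem.List.len t == 1 || (pvKeysOf S).contains (PySem.List.pyGetD t (-1) 0)))
          :: S :: P

def pvAgree (L L' : List (Int × List Int)) (Ks : PySem.Set Int) : Prop :=
  ∀ K : Int, Ks.contains K = true →
    L'.filter (fun p => p.1 == K) = L.filter (fun p => p.1 == K)

-- step lemmas
theorem pvGroupAdd_eq (d : PySem.Dict Int (List (List Int))) (k : Int) (t : List Int) :
    pvGroupAdd d k t = pvIns d (k, t) := by
  unfold pvGroupAdd pvIns
  by_cases h : d.contains k = true
  · simp [h]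
  · simp only [Bool.not_eq_true] at h
    simp [h, PySem.Dict.insert_insert_self, PySem.Dict.getD_insert_self,
      PySem.Dict.getD_of_not_contains d ([] : List (List Int)) h]

theorem pvSetdefaultAdd_eq (d : PySem.Dict Int (List (List Int))) (k : Int) (t : List Int) :
    pvSetdefaultAdd d k t = pvIns d (k, t) := by
  unfold pvSetdefaultAdd pvIns
  by_cases h : d.contains k = true
  · simp [PySem.Dict.setdefault_of_contains d ([] : List (List Int)) h]
  · simp only [Bool.not_eq_true] at h
    simp [PySem.Dict.setdefault_of_not_contains d ([] : List (List Int)) h,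
      PySem.Dict.insert_insert_self, PySem.Dict.getD_insert_self,
      PySem.Dict.getD_of_not_contains d ([] : List (List Int)) h]

theorem pvDict_getD (L : List (Int × List Int)) (d : PySem.Dict Int (List (List Int))) (c : Int) :
    (L.foldl pvIns d).getD c [] = d.getD c [] ++ (L.filter (fun p => p.1 == c)).map (·.2) := by
  induction L generalizing d with
  | nil => simp
  | cons p L ih =>
    simp only [List.foldl_cons, List.filter_cons]
    rw [ih]
    by_cases h : p.1 = c
    · simp [pvIns, h]
    · simp [pvIns, PySem.Dict.getD_insert, h, Ne.symm h]

theorem pvDict_getD_empty (L : List (Int × List Int)) (c : Int) :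
    (pvDict L).getD c [] = (L.filter (fun p => p.1 == c)).map (·.2) := by
  unfold pvDict
  rw [pvDict_getD]
  rw [PySem.Dict.getD_empty]
  rfl

-- port A innermost loops
theorem pvAFirst_fold (R : List (List Int)) :
    R.foldl pvAFirst PySem.Dict.empty = pvDict (pvL0 R) := by
  unfold pvDict pvL0
  rw [List.foldl_map]
  have hf : pvAFirst = fun d t => pvIns d (PySem.List.pyGetD t 1 0, t) := by
    funext d t
    simp [pvAFirst, pvGroupAdd_eq]
  rw [hf]

theorem pvARest_step (L : List (Int × List Int)) (t : List Int)
    (d : PySem.Dict Int (List (List Int))) :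
    pvARest (pvDict L) d t = (pvSeg L t).foldl pvIns d := by
  unfold pvARest pvSeg
  by_cases h : (pvDict L).contains (PySem.List.pyGetD t 0 0) = true
  · simp only [h, if_true, pvDict_getD_empty, List.map_map, List.foldl_map]
    simp [pvGroupAdd_eq, Function.comp]
  · simp only [Bool.not_eq_true] at h
    have h0 : (pvDict L).getD (PySem.List.pyGetD t 0 0) [] = [] :=
      PySem.Dict.getD_of_not_contains _ ([] : List (List Int)) h
    rw [pvDict_getD_empty] at h0
    have : L.filter (fun p => p.1 == PySem.List.pyGetD t 0 0) = [] :=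
      List.map_eq_nil_iff.mp h0
    simp [h, this]

theorem pvARest_fold (L : List (Int × List Int)) (R : List (List Int))
    (d : PySem.Dict Int (List (List Int))) :
    R.foldl (pvARest (pvDict L)) d = (pvBStep L R).foldl pvIns d := by
  induction R generalizing d with
  | nil => simp [pvBStep]
  | cons t R ih =>
    simp only [List.foldl_cons, pvBStep, List.flatMap_cons, List.foldl_append]
    rw [pvARest_step, ih]
    rfl

-- port A H-list bookkeeping
theorem pvA_enum_fold (rels : List (List (List Int))) :
    ∀ (i : Nat) (H : List (PySem.Dict Int (List (List Int)))) (L : List (Int × List Int)),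
      1 ≤ i → i + rels.length ≤ H.length →
      H.getD (i - 1) PySem.Dict.empty = pvDict L →
      (∀ j : Nat, i ≤ j → j < H.length → H.getD j PySem.Dict.empty = PySem.Dict.empty) →
      ((PySem.List.enumerate rels (i : Int)).foldl pvAStep H).getD (i + rels.length - 1)
          PySem.Dict.empty = pvDict (rels.foldl pvBStep L) := by
  induction rels with
  | nil =>
    intro i H L h1 _ hprev _
    simpa using hprev
  | cons R rs ih =>
    intro i H L h1 hlen hprev hemp
    have hlen' : i + (rs.length + 1) ≤ H.length := by simpa using hlen
    rw [PySem.List.enumerate_cons, List.foldl_cons]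
    have hi0 : ((i : Int)) ≠ 0 := by omega
    have hstep : pvAStep H ((i : Int), R) =
        PySem.List.pySetD H (i : Int)
          (R.foldl (pvARest (PySem.List.pyGetD H ((i : Int) - 1) PySem.Dict.empty))
            (PySem.List.pyGetD H (i : Int) PySem.Dict.empty)) := by
      simp only [pvAStep, hi0, if_false]
    have hcast : ((i : Int)) - 1 = ((i - 1 : Nat) : Int) := by omega
    have hget1 : PySem.List.pyGetD H ((i : Int) - 1) PySem.Dict.empty = pvDict L := by
      rw [hcast, PySem.List.pyGetD_natCast]
      exact hprev
    have hgeti : PySem.List.pyGetD H (i : Int) PySem.Dict.empty = PySem.Dict.empty := by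
      rw [PySem.List.pyGetD_natCast]
      exact hemp i le_rfl (by omega)
    have hset : PySem.List.pySetD H (i : Int) ((pvBStep L R).foldl pvIns PySem.Dict.empty) =
        H.set i ((pvBStep L R).foldl pvIns PySem.Dict.empty) := by
      simp [PySem.List.pySetD_natCast]
    rw [hstep, hget1, hgeti, pvARest_fold, hset]
    have hcast2 : ((i : Int)) + 1 = (((i + 1 : Nat)) : Int) := by push_cast; ring
    rw [hcast2]
    have hres := ih (i + 1) (H.set i ((pvBStep L R).foldl pvIns PySem.Dict.empty)) (pvBStep L R)
      (by omega)
      (by simp only [List.length_set]; omega)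
      (by
        simp only [Nat.add_sub_cancel, List.getD]
        rw [List.getElem?_set_self (by omega)]
        rfl)
      (by
        intro j hj hjl
        simp only [List.length_set] at hjl
        simp only [List.getD]
        rw [List.getElem?_set_ne (by omega)]
        exact hemp j (by omega) hjl)
    have harith : i + 1 + rs.length - 1 = i + (R :: rs).length - 1 := by
      simp only [List.length_cons]; omega
    rw [harith] at hres
    exact hres

theorem pvFoldAppend (l : List (List (List Int))) (acc : List (List Int)) :
    l.foldl (fun result tuples => result ++ tuples) acc = acc ++ l.flatten := by
  induction l generalizing acc with
  | nil => simp
  | cons x l ih => simp [ih]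

theorem pvConstGetD (l : List Int) (j : Nat) :
    ((l.map (fun _ => (PySem.Dict.empty : PySem.Dict Int (List (List Int))))).getD j
      PySem.Dict.empty) = PySem.Dict.empty := by
  rw [List.getD]
  cases h : (l.map (fun _ => (PySem.Dict.empty : PySem.Dict Int (List (List Int)))))[j]? with
  | none => rfl
  | some d =>
    have := List.getElem?_map (f := fun _ => (PySem.Dict.empty : PySem.Dict Int (List (List Int)))) (l := l) (i := j)
    rw [this] at h
    cases h2 : l[j]? with
    | none => rw [h2] at h; simp at h
    | some x => rw [h2] at h; simp at h; simp [← h]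

theorem portA_eq (R0 : List (List Int)) (rest : List (List (List Int))) :
    line_join_query_p3_2 (R0 :: rest) = pvFinal (rest.foldl pvBStep (pvL0 R0)) := by
  have h0 : line_join_query_p3_2 (R0 :: rest) =
      (PySem.List.pyGetD
        ((PySem.List.enumerate (R0 :: rest) 0).foldl pvAStep
          ((PySem.List.pyRange 0 (PySem.List.len (R0 :: rest)) 1).map
            (fun _ => PySem.Dict.empty)))
        (PySem.List.len (R0 :: rest) - 1) PySem.Dict.empty).values.foldl
        (fun result tuples => result ++ tuples) [] := rfl
  rw [h0]
  have hk : PySem.List.len (R0 :: rest) = ((rest.length + 1 : Nat) : Int) := by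
    simp [PySem.List.len_eq]
  set H0 : List (PySem.Dict Int (List (List Int))) :=
    (PySem.List.pyRange 0 (PySem.List.len (R0 :: rest)) 1).map (fun _ => PySem.Dict.empty)
    with hH0
  have hlenH0 : H0.length = rest.length + 1 := by
    rw [hH0, List.length_map, PySem.List.length_pyRange_one, hk]
    simp
  have hgetH0 : ∀ j : Nat, H0.getD j PySem.Dict.empty = PySem.Dict.empty := by
    intro j
    rw [hH0]
    exact pvConstGetD _ j
  rw [PySem.List.enumerate_cons, List.foldl_cons]
  have hstep0 : pvAStep H0 ((0 : Int), R0) =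
      PySem.List.pySetD H0 (0 : Int)
        (R0.foldl pvAFirst (PySem.List.pyGetD H0 (0 : Int) PySem.Dict.empty)) := by
    simp [pvAStep]
  have hget00 : PySem.List.pyGetD H0 (0 : Int) PySem.Dict.empty = PySem.Dict.empty := by
    rw [PySem.List.pyGetD_zero]
    exact hgetH0 0
  have hset0 : PySem.List.pySetD H0 (0 : Int) (pvDict (pvL0 R0)) =
      H0.set 0 (pvDict (pvL0 R0)) := by
    rw [PySem.List.pySetD_of_nonneg _ _ (by norm_num)]
    rfl
  rw [hstep0, hget00, pvAFirst_fold, hset0]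
  set H1 := H0.set 0 (pvDict (pvL0 R0)) with hH1
  have hlenH1 : H1.length = rest.length + 1 := by simp [hH1, hlenH0]
  have hs1 : ((0 : Int) + 1) = ((1 : Nat) : Int) := by norm_num
  rw [hs1]
  have hres := pvA_enum_fold rest 1 H1 (pvL0 R0) le_rfl (by omega)
    (by
      simp only [Nat.sub_self, hH1, List.getD]
      rw [List.getElem?_set_self (by omega)]
      rfl)
    (by
      intro j hj hjl
      rw [hH1]
      simp only [List.getD]
      rw [List.getElem?_set_ne (by omega)]
      have := hgetH0 j
      simpa [List.getD] using this)
  have hidx : PySem.List.len (R0 :: rest) - 1 = ((rest.length : Nat) : Int) := by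
    rw [hk]; push_cast; ring
  rw [hidx, PySem.List.pyGetD_natCast]
  have harith : 1 + rest.length - 1 = rest.length := by omega
  rw [harith] at hres
  rw [hres, pvFoldAppend]
  simp [pvFinal]

-- port B shape
theorem pvPrune_eq_nil_iff (rest : List (List (List Int))) : pvPrune rest = [] ↔ rest = [] := by
  cases rest with
  | nil => simp [pvPrune]
  | cons R rs =>
    simp only [pvPrune]
    cases h : pvPrune rs <;> simp

theorem pvBack_fold (rest : List (List (List Int))) :
    rest.reverse.foldl pvBBack ([], none)
      = ((pvPrune rest).reverse, (pvPrune rest).head?.map pvKeysOf) := by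
  induction rest with
  | nil => simp [pvPrune]
  | cons R rs ih =>
    rw [List.reverse_cons, List.foldl_append, ih, List.foldl_cons, List.foldl_nil]
    cases h : pvPrune rs with
    | nil => simp [pvBBack, pvPrune, h, pvKeysOf]
    | cons S P => simp [pvBBack, pvPrune, h, pvKeysOf]

theorem pvBJoin_eq (L : List (Int × List Int)) (R : List (List Int)) :
    pvBJoin (pvDict L) R = pvDict (pvBStep L R) := by
  unfold pvBJoin
  suffices h : ∀ d0, R.foldl (fun nxt t =>
      ((pvDict L).getD (PySem.List.pyGetD t 0 0) []).foldl (fun nxt p =>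
        pvSetdefaultAdd nxt
          (PySem.List.pyGetD (p ++ PySem.List.slice t (some 1) none) (-1) 0)
          (p ++ PySem.List.slice t (some 1) none)) nxt) d0
      = (pvBStep L R).foldl pvIns d0 by
    exact h PySem.Dict.empty
  intro d0
  induction R generalizing d0 with
  | nil => simp [pvBStep]
  | cons t R ih =>
    simp only [List.foldl_cons, pvBStep, List.flatMap_cons, List.foldl_append]
    rw [ih]
    congr 1
    rw [pvDict_getD_empty, List.foldl_map]
    unfold pvSeg
    rw [List.foldl_map]
    simp [pvSetdefaultAdd_eq]

-- forward hash join over a list of levels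
theorem pvBFirst_fold (R : List (List Int)) :
    R.foldl (fun d t => pvSetdefaultAdd d (PySem.List.pyGetD t 1 0) t) PySem.Dict.empty
      = pvDict (pvL0 R) := by
  unfold pvDict pvL0
  rw [List.foldl_map]
  simp only [pvSetdefaultAdd_eq]

theorem pvBChain (P : List (List (List Int))) (L : List (Int × List Int)) :
    P.foldl pvBJoin (pvDict L) = pvDict (P.foldl pvBStep L) := by
  induction P generalizing L with
  | nil => rfl
  | cons R P ih => rw [List.foldl_cons, List.foldl_cons, pvBJoin_eq, ih]

theorem pvFlatMapId (l : List (List (List Int))) : l.flatMap (fun b => b) = l.flatten := by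
  induction l with
  | nil => rfl
  | cons x l ih => simp [List.flatMap_cons, ih]

theorem portB_eq (R0 : List (List Int)) (rest : List (List (List Int))) :
    line_join_query_p3_2_alt (R0 :: rest) =
      pvFinal ((pvPrune rest).foldl pvBStep
        (pvL0 (match (pvPrune rest).head?.map pvKeysOf with
          | some keys => R0.filter (fun t => keys.contains (PySem.List.pyGetD t 1 0))
          | none => R0))) := by
  have h0 : line_join_query_p3_2_alt (R0 :: rest) =
      (let pk := (PySem.List.slice (R0 :: rest) (some 1) none).reverse.foldl pvBBack ([], none)
       let pruned := pk.1.reverse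
       let first :=
         if pruned ≠ [] then
           match pk.2 with
           | some keys => (PySem.List.pyGetD (R0 :: rest) 0 []).filter
               (fun t => keys.contains (PySem.List.pyGetD t 1 0))
           | none => PySem.List.pyGetD (R0 :: rest) 0 []
         else PySem.List.pyGetD (R0 :: rest) 0 []
       let d := first.foldl (fun d t => pvSetdefaultAdd d (PySem.List.pyGetD t 1 0) t)
         PySem.Dict.empty
       let d := pruned.foldl pvBJoin d
       d.values.flatMap (fun bucket => bucket)) := rfl
  rw [h0]
  have hslice : PySem.List.slice (R0 :: rest) (some 1) none = rest := by
    rw [PySem.List.slice_from_one]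
    rfl
  have hfirst0 : PySem.List.pyGetD (R0 :: rest) 0 ([] : List (List Int)) = R0 :=
    PySem.List.pyGetD_zero_cons _ _ _
  simp only [hslice, hfirst0, pvBack_fold, List.reverse_reverse]
  cases h : pvPrune rest with
  | nil =>
    simp only [List.head?_nil, Option.map_none, ne_eq,
      not_true_eq_false, if_false, List.foldl_nil]
    rw [pvBFirst_fold, pvFlatMapId]
    rfl
  | cons S P =>
    simp only [List.head?_cons, Option.map_some, ne_eq]
    have hne : (S :: P).reverse.reverse ≠ [] := by simp
    simp only [List.reverse_reverse] at hne ⊢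
    rw [if_pos (by simp)]
    rw [pvBFirst_fold, pvBChain, pvFlatMapId]
    rfl

-- auxiliary list lemmas
theorem pvLastD_append (l1 l2 : List Int) (h : l2 ≠ []) :
    PySem.List.pyGetD (l1 ++ l2) (-1) 0 = PySem.List.pyGetD l2 (-1) 0 := by
  rw [PySem.List.pyGetD_neg_one (l1 ++ l2) 0 (by simp [h]), PySem.List.pyGetD_neg_one l2 0 h]
  exact List.getLast_append_of_ne_nil _ h

theorem pvFilter_flatMap {α β : Type} (l : List α) (f : α → List β) (p : β → Bool) :
    (l.flatMap f).filter p = l.flatMap (fun a => (f a).filter p) := by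
  induction l with
  | nil => simp
  | cons x l ih => simp [List.flatMap_cons, List.filter_append, ih]

theorem pvFlatMap_filter {α β : Type} (l : List α) (p : α → Bool) (f : α → List β)
    (h : ∀ x ∈ l, p x = false → f x = []) :
    (l.filter p).flatMap f = l.flatMap f := by
  induction l with
  | nil => simp
  | cons x l ih =>
    cases hx : p x with
    | true =>
      simp [hx, List.flatMap_cons,
        ih (fun y hy hp => h y (List.mem_cons_of_mem _ hy) hp)]
    | false =>
      simp [hx, List.flatMap_cons, h x (List.mem_cons_self) hx,
        ih (fun y hy hp => h y (List.mem_cons_of_mem _ hy) hp)]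

-- the semi-join invariance argument
theorem pvBStep_congr (L L' : List (Int × List Int)) (R : List (List Int))
    (h : ∀ t ∈ R, L'.filter (fun p => p.1 == PySem.List.pyGetD t 0 0)
      = L.filter (fun p => p.1 == PySem.List.pyGetD t 0 0)) :
    pvBStep L' R = pvBStep L R := by
  unfold pvBStep
  induction R with
  | nil => rfl
  | cons t R ih =>
    simp only [List.flatMap_cons]
    rw [ih (fun x hx => h x (List.mem_cons_of_mem _ hx))]
    congr 1
    unfold pvSeg
    rw [h t List.mem_cons_self]

theorem pvMem_keysOf (S : List (List Int)) (t : List Int) (ht : t ∈ S) :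
    (pvKeysOf S).contains (PySem.List.pyGetD t 0 0) = true := by
  rw [pvKeysOf, PySem.Set.contains_iff, PySem.Set.mem_ofList]
  exact List.mem_map_of_mem ht

theorem pvSeg_key_mem (L : List (Int × List Int)) (t : List Int) (x : Int × List Int)
    (hx : x ∈ pvSeg L t) (hlen : 2 ≤ t.length) :
    x.1 = PySem.List.pyGetD t (-1) 0 := by
  unfold pvSeg at hx
  obtain ⟨p, _, rfl⟩ := List.mem_map.mp hx
  cases t with
  | nil => simp at hlen
  | cons a ts =>
    have hts : ts ≠ [] := by
      intro hcon
      rw [hcon] at hlen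
      simp at hlen
    have hslice : PySem.List.slice (a :: ts) (some 1) none = ts := by
      rw [PySem.List.slice_from_one]
      rfl
    calc (PySem.List.pyGetD (p.2 ++ PySem.List.slice (a :: ts) (some 1) none) (-1) 0, _).1
        = PySem.List.pyGetD (p.2 ++ ts) (-1) 0 := by rw [hslice]
      _ = PySem.List.pyGetD ts (-1) 0 := pvLastD_append _ _ hts
      _ = PySem.List.pyGetD ([a] ++ ts) (-1) 0 := (pvLastD_append _ _ hts).symm
      _ = PySem.List.pyGetD (a :: ts) (-1) 0 := by rw [List.singleton_append]

theorem pvAgree_bstep (Knext : PySem.Set Int) (L L' : List (Int × List Int))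
    (R : List (List Int)) (hlen : ∀ t ∈ R, 1 ≤ t.length)
    (hag : pvAgree L L' (pvKeysOf (R.filter (fun t =>
      PySem.List.len t == 1 || Knext.contains (PySem.List.pyGetD t (-1) 0))))) :
    pvAgree (pvBStep L R)
      (pvBStep L' (R.filter (fun t =>
        PySem.List.len t == 1 || Knext.contains (PySem.List.pyGetD t (-1) 0)))) Knext := by
  intro K hK
  set keep : List Int → Bool := fun t =>
    PySem.List.len t == 1 || Knext.contains (PySem.List.pyGetD t (-1) 0) with hkeep
  have h1 : pvBStep L' (R.filter keep) = pvBStep L (R.filter keep) := by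
    apply pvBStep_congr
    intro t ht
    exact hag _ (pvMem_keysOf _ t ht)
  rw [h1]
  unfold pvBStep
  rw [pvFilter_flatMap, pvFilter_flatMap]
  apply pvFlatMap_filter
  intro t ht hkf
  have hlt : 2 ≤ t.length := by
    have h1t := hlen t ht
    have : (PySem.List.len t == 1) = false := by
      rcases Bool.or_eq_false_iff.mp hkf with ⟨ha, _⟩
      exact ha
    rw [PySem.List.len_eq] at this
    simp only [beq_eq_false_iff_ne, ne_eq] at this
    omega
  have hcf : Knext.contains (PySem.List.pyGetD t (-1) 0) = false :=
    (Bool.or_eq_false_iff.mp hkf).2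
  apply List.filter_eq_nil_iff.mpr
  intro x hx
  rw [pvSeg_key_mem L t x hx hlt]
  simp only [beq_iff_eq]
  intro hcon
  rw [hcon, hK] at hcf
  simp at hcf

theorem pvMain (rest : List (List (List Int))) :
    ∀ (L L' : List (Int × List Int)), rest ≠ [] →
      (∀ R ∈ rest, ∀ t ∈ R, 1 ≤ t.length) →
      pvAgree L L' (pvKeysOf ((pvPrune rest).headD [])) →
      (pvPrune rest).foldl pvBStep L' = rest.foldl pvBStep L := by
  induction rest with
  | nil => intro L L' hne _ _; exact absurd rfl hne
  | cons R rs ih =>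
    intro L L' _ hlen hag
    cases h : pvPrune rs with
    | nil =>
      have hrs : rs = [] := (pvPrune_eq_nil_iff rs).mp h
      subst hrs
      simp only [pvPrune, List.headD_cons] at hag ⊢
      simp only [List.foldl_cons, List.foldl_nil]
      apply pvBStep_congr
      intro t ht
      exact hag _ (pvMem_keysOf _ t ht)
    | cons S P =>
      have hrsne : rs ≠ [] := by
        intro he; subst he; simp [pvPrune] at h
      set Rf := R.filter (fun t => PySem.List.len t == 1 ||
        (pvKeysOf S).contains (PySem.List.pyGetD t (-1) 0)) with hRf
      have hps : pvPrune (R :: rs) = Rf :: S :: P := by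
        simp only [pvPrune, h, hRf]
      rw [hps] at hag ⊢
      simp only [List.headD_cons] at hag
      have e1 : (Rf :: S :: P).foldl pvBStep L' = (S :: P).foldl pvBStep (pvBStep L' Rf) := rfl
      have e2 : (R :: rs).foldl pvBStep L = rs.foldl pvBStep (pvBStep L R) := rfl
      rw [e1, e2, ← h]
      apply ih (pvBStep L R) _ hrsne
        (fun R2 hR2 t ht => hlen R2 (List.mem_cons_of_mem _ hR2) t ht)
      have hhd : (pvPrune rs).headD [] = S := by rw [h]; rfl
      rw [hhd, hRf]
      rw [hRf] at hag
      exact pvAgree_bstep (pvKeysOf S) L L' R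
        (fun t ht => hlen R List.mem_cons_self t ht) hag

theorem pvAgree_L0 (R0 : List (List Int)) (Ks : PySem.Set Int) :
    pvAgree (pvL0 R0) (pvL0 (R0.filter (fun t => Ks.contains (PySem.List.pyGetD t 1 0)))) Ks := by
  intro K hK
  unfold pvL0
  rw [List.filter_map, List.filter_map]
  congr 1
  rw [List.filter_filter]
  apply List.filter_congr
  intro t _
  simp only [Function.comp]
  by_cases ht : PySem.List.pyGetD t 1 0 = K
  · rw [ht, hK]
    simp
  · simp [ht]

-- ===== VERDICT (by name: the statement is the Claim_ definition above) =====
theorem line_join_query_p3_2_spec : Claim_equal_line_join_query_p3_2 := by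
  unfold Claim_equal_line_join_query_p3_2
  intro relations _ hpre
  obtain ⟨hne, hfirst, htail⟩ := hpre
  unfold Spec_line_join_query_p3_2
  cases relations with
  | nil => exact absurd rfl hne
  | cons R0 rest =>
    rw [portA_eq, portB_eq]
    cases h : pvPrune rest with
    | nil =>
      have hrs : rest = [] := (pvPrune_eq_nil_iff rest).mp h
      subst hrs
      rfl
    | cons S P =>
      have hrne : rest ≠ [] := by
        intro he; subst he; simp [pvPrune] at h
      simp only [List.head?_cons, Option.map_some]
      congr 1
      rw [← h]
      refine (pvMain rest (pvL0 R0) _ hrne ?_ ?_).symm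
      · intro R hR t ht
        exact htail R (by simpa using hR) t ht
      · have hhd : (pvPrune rest).headD [] = S := by rw [h]; rfl
        rw [hhd]
        exact pvAgree_L0 R0 (pvKeysOf S)
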